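-- pv_equiv track=rewrite | github.com/HoYoung1/backjoon-Level | backjoon_level_python/3019.py | solve
-- ===== SOURCE A (Python) =====
-- block_rotate = {
--     1: [[0], [0, 0, 0, 0]],
--     2: [[0, 0]],
--     3: [[0, 0, 1], [1, 0]],
--     4: [[1, 0, 0], [0, 1]],
--     5: [[0, 0, 0], [0, 1], [1, 0, 1], [1, 0]],
--     6: [[0, 0, 0], [0, 0], [0, 1, 1], [2, 0]],
--     7: [[0, 0, 0], [0, 2], [1, 1, 0], [0, 0]]
-- }
--
-- def solve(c, p, heights):
--     answer = 0
--
--     block = block_rotate[p]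
--     rotate_num = len(block)
--     for i in range(rotate_num):
--         for j in range(0, c - len(block[i]) + 1):
--             success = True
--             before_value = heights[j] - block[i][0]
--             for k in range(len(block[i])):
--                 idx = j+k
--                 if before_value != heights[idx] - block[i][k]:
--                     success = False
--                     break
--                 before_value = heights[idx] - block[i][k]
--             if success:
--                 answer += 1
--
--     return answer
-- ===== SOURCE B (Python) =====
-- block_rotate = {
--     1: [[0], [0, 0, 0, 0]],
--     2: [[0, 0]],
--     3: [[0, 0, 1], [1, 0]],
--     4: [[1, 0, 0], [0, 1]],
--     5: [[0, 0, 0], [0, 1], [1, 0, 1], [1, 0]],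
--     6: [[0, 0, 0], [0, 0], [0, 1, 1], [2, 0]],
--     7: [[0, 0, 0], [0, 2], [1, 1, 0], [0, 0]]
-- }
--
--
-- def solve(c, p, heights):
--     # adjacent-difference profile of the first c columns, computed once
--     diffs = [heights[i + 1] - heights[i] for i in range(c - 1)]
--     answer = 0
--     for shape in block_rotate[p]:
--         pattern = [shape[t + 1] - shape[t] for t in range(len(shape) - 1)]
--         for j in range(c - len(shape) + 1):
--             if diffs[j:j + len(pattern)] == pattern:
--                 answer += 1
--     return answer
-- ===== Notes on version B (the rewrite author's own statement) =====
-- stated objective: alternative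
-- what changed: B precomputes the adjacent-difference array of the heights once and, per rotation, the shape's difference pattern, then counts start positions whose difference window equals the pattern, replacing A's per-position before_value chain over the raw heights.
import Mathlib
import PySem

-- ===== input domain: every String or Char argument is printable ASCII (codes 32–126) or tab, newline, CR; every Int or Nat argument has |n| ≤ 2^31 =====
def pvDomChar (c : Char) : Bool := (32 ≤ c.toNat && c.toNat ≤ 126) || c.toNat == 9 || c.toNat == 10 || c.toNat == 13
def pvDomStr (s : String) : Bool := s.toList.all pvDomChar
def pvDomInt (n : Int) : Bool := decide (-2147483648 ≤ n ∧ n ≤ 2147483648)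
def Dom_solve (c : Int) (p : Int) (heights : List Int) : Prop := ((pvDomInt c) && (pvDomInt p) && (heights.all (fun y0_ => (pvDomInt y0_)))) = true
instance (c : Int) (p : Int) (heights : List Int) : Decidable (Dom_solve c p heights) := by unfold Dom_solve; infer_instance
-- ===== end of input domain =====

-- B replaces A's per-position before_value chain by a precomputed adjacent-difference
-- array matched against each rotation's difference pattern (alternative decomposition,
-- same asymptotic cost).

-- ===== PORT A =====
-- the module-level block_rotate dict (both Pythons share it); lookup is total here,
-- Pre_solve restricts to the keys 1..7 on which Python's dict lookup succeeds
def pvBlockRotate (p : Int) : List (List Int) :=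
  if p = 1 then [[0], [0, 0, 0, 0]]
  else if p = 2 then [[0, 0]]
  else if p = 3 then [[0, 0, 1], [1, 0]]
  else if p = 4 then [[1, 0, 0], [0, 1]]
  else if p = 5 then [[0, 0, 0], [0, 1], [1, 0, 1], [1, 0]]
  else if p = 6 then [[0, 0, 0], [0, 0], [0, 1, 1], [2, 0]]
  else [[0, 0, 0], [0, 2], [1, 1, 0], [0, 0]]

-- A's inner 'for k in range(len(block[i]))' with break: recursion over the k-list,
-- state = before_value; heights[idx] is pyGetD (in range on Pre_solve)
def pvCheckA (heights b : List Int) (j : Int) : List Int → Int → Bool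
  | [], _ => true
  | k :: ks, before =>
      if before ≠ PySem.List.pyGetD heights (j + k) 0 - PySem.List.pyGetD b k 0 then false
      else pvCheckA heights b j ks (PySem.List.pyGetD heights (j + k) 0 - PySem.List.pyGetD b k 0)

-- A's 'for j in range(0, c - len(block[i]) + 1)' loop for one rotation
def pvPlaceA (heights : List Int) (c : Int) (b : List Int) (answer : Int) : Int :=
  (PySem.List.pyRange 0 (c - (b.length : Int) + 1) 1).foldl
    (fun ans j =>
      if pvCheckA heights b j (PySem.List.pyRange 0 (b.length : Int) 1)
           (PySem.List.pyGetD heights j 0 - PySem.List.pyGetD b 0 0) then ans + 1 else ans)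
    answer

def solve (c : Int) (p : Int) (heights : List Int) : Int :=
  (pvBlockRotate p).foldl (fun answer b => pvPlaceA heights c b answer) 0

-- ===== PORT B =====
-- diffs = [heights[i+1] - heights[i] for i in range(c - 1)]
def pvDiffs (heights : List Int) (c : Int) : List Int :=
  (PySem.List.pyRange 0 (c - 1) 1).map
    (fun i => PySem.List.pyGetD heights (i + 1) 0 - PySem.List.pyGetD heights i 0)

-- pattern = [shape[t+1] - shape[t] for t in range(len(shape) - 1)]
def pvPattern (shape : List Int) : List Int :=
  (PySem.List.pyRange 0 ((shape.length : Int) - 1) 1).map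
    (fun t => PySem.List.pyGetD shape (t + 1) 0 - PySem.List.pyGetD shape t 0)

-- B's 'for j in range(c - len(shape) + 1): if diffs[j:j+len(pattern)] == pattern'
def pvPlaceB (diffs : List Int) (c : Int) (shape : List Int) (answer : Int) : Int :=
  (PySem.List.pyRange 0 (c - (shape.length : Int) + 1) 1).foldl
    (fun ans j =>
      if PySem.List.slice diffs (some j) (some (j + ((pvPattern shape).length : Int))) = pvPattern shape
      then ans + 1 else ans)
    answer

def solve_alt (c : Int) (p : Int) (heights : List Int) : Int :=
  (pvBlockRotate p).foldl (fun answer shape => pvPlaceB (pvDiffs heights c) c shape answer) 0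

-- ===== PRECONDITION & SPEC =====
-- exactly where the Python A returns: p a key of block_rotate (else KeyError), and the
-- heights indices it reads exist — every p has a rotation of width ≤ 2 whose first two
-- reads never mismatch, so A raises IndexError iff heights is shorter than c and some
-- rotation's j-range is nonempty (c ≥ 2, or c = 1 with the width-1 rotation of p = 1)
def Pre_solve (c : Int) (p : Int) (heights : List Int) : Prop :=
  (1 ≤ p ∧ p ≤ 7) ∧ (c ≤ (heights.length : Int) ∨ c ≤ 0 ∨ (c = 1 ∧ p ≠ 1))
instance (c : Int) (p : Int) (heights : List Int) : Decidable (Pre_solve c p heights) := by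
  unfold Pre_solve; infer_instance

def pvWitness_solve : Int × Int × List Int := (4, 1, [1, 1, 1, 1])

def Spec_solve (c : Int) (p : Int) (heights : List Int) (out : Int) : Prop := out = solve_alt c p heights
instance (c : Int) (p : Int) (heights : List Int) (out : Int) : Decidable (Spec_solve c p heights out) := by
  unfold Spec_solve; infer_instance

-- ===== CLAIM (what is proved, stated in full; the proofs are below) =====
def Claim_equal_solve : Prop := ∀ (c : Int) (p : Int) (heights : List Int), Dom_solve c p heights → Pre_solve c p heights → Spec_solve c p heights (solve c p heights)

-- ===== LEMMAS AND PROOFS =====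

-- the slice diffs[n : n+m] written out elementwise (m ≤ length of diffs)
lemma pv_slice_diffs (H : List Int) (c : Int) (n m : Nat) (h : (n : Int) + (m : Int) ≤ c - 1) :
    PySem.List.slice (pvDiffs H c) (some (n : Int)) (some ((n : Int) + (m : Int))) =
      (List.range m).map (fun t =>
        PySem.List.pyGetD H (((n + t : Nat) : Int) + 1) 0 - PySem.List.pyGetD H ((n + t : Nat) : Int) 0) := by
  rw [PySem.List.slice_natCast_add]
  have hlen : (pvDiffs H c).length = (c - 1).toNat := by
    simp [pvDiffs, PySem.List.length_pyRange_one]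
  apply List.ext_getElem
  · simp [hlen]; omega
  · intro t h1 h2
    have ht : t < m := by simpa using h2
    have htn : n + t < (c - 1).toNat := by simp [hlen] at h1 ⊢; omega
    simp only [pvDiffs, List.getElem_take, List.getElem_drop, List.getElem_map,
      PySem.List.getElem_pyRange_one, List.getElem_range]
    push_cast
    ring_nf

-- per-width bridges: A's chained check equals B's window-equals-pattern test
lemma pvCond1 (H : List Int) (c b0 : Int) :
    ∀ j ∈ PySem.List.pyRange 0 (c - (([b0] : List Int).length : Int) + 1) 1,
      ((pvCheckA H [b0] j (PySem.List.pyRange 0 ((([b0] : List Int)).length : Int) 1)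
          (PySem.List.pyGetD H j 0 - PySem.List.pyGetD [b0] 0 0)) = true
        ↔ PySem.List.slice (pvDiffs H c) (some j) (some (j + ((pvPattern [b0]).length : Int)))
            = pvPattern [b0]) := by
  intro j hj
  rw [PySem.List.mem_pyRange_one] at hj
  simp only [List.length_cons, List.length_nil] at hj ⊢
  push_cast at hj
  obtain ⟨n, rfl⟩ : ∃ n : Nat, j = (n : Int) := ⟨j.toNat, (Int.toNat_of_nonneg hj.1).symm⟩
  have hpat : pvPattern [b0] = [] := by
    simp [pvPattern, show PySem.List.pyRange 0 0 1 = [] from by decide]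
  have hs := pv_slice_diffs H c n 0 (by push_cast; omega)
  simp only [List.range_zero, List.map_nil] at hs
  rw [hpat]
  simp only [List.length_nil]
  push_cast at hs ⊢
  rw [show (n : Int) + 0 = (n : Int) from by ring] at hs ⊢
  rw [hs]
  rw [show PySem.List.pyRange 0 (1 : Int) 1 = [0] from by decide]
  simp [pvCheckA, PySem.List.pyGetD, PySem.List.pyIdx?, PySem.List.pyGet?]

lemma pvCond2 (H : List Int) (c b0 b1 : Int) :
    ∀ j ∈ PySem.List.pyRange 0 (c - (([b0, b1] : List Int).length : Int) + 1) 1,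
      ((pvCheckA H [b0, b1] j (PySem.List.pyRange 0 ((([b0, b1] : List Int)).length : Int) 1)
          (PySem.List.pyGetD H j 0 - PySem.List.pyGetD [b0, b1] 0 0)) = true
        ↔ PySem.List.slice (pvDiffs H c) (some j) (some (j + ((pvPattern [b0, b1]).length : Int)))
            = pvPattern [b0, b1]) := by
  intro j hj
  rw [PySem.List.mem_pyRange_one] at hj
  simp only [List.length_cons, List.length_nil] at hj
  push_cast at hj
  obtain ⟨n, rfl⟩ : ∃ n : Nat, j = (n : Int) := ⟨j.toNat, (Int.toNat_of_nonneg hj.1).symm⟩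
  have hpat : pvPattern [b0, b1] = [b1 - b0] := by
    simp [pvPattern, show PySem.List.pyRange 0 1 1 = [0] from by decide, PySem.List.pyGetD,
      PySem.List.pyIdx?, PySem.List.pyGet?]
  have hs := pv_slice_diffs H c n 1 (by push_cast; omega)
  simp only [List.range_succ, List.range_zero, List.nil_append, List.map_cons, List.map_nil] at hs
  rw [hpat]
  simp only [List.length_cons, List.length_nil]
  push_cast at hs ⊢
  rw [hs]
  rw [show PySem.List.pyRange 0 (2 : Int) 1 = [0, 1] from by decide]
  simp [pvCheckA, PySem.List.pyGetD, PySem.List.pyIdx?, PySem.List.pyGet?]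
  ring_nf
  omega

lemma pvCond3 (H : List Int) (c b0 b1 b2 : Int) :
    ∀ j ∈ PySem.List.pyRange 0 (c - (([b0, b1, b2] : List Int).length : Int) + 1) 1,
      ((pvCheckA H [b0, b1, b2] j (PySem.List.pyRange 0 ((([b0, b1, b2] : List Int)).length : Int) 1)
          (PySem.List.pyGetD H j 0 - PySem.List.pyGetD [b0, b1, b2] 0 0)) = true
        ↔ PySem.List.slice (pvDiffs H c) (some j) (some (j + ((pvPattern [b0, b1, b2]).length : Int)))
            = pvPattern [b0, b1, b2]) := by
  intro j hj
  rw [PySem.List.mem_pyRange_one] at hj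
  simp only [List.length_cons, List.length_nil] at hj
  push_cast at hj
  obtain ⟨n, rfl⟩ : ∃ n : Nat, j = (n : Int) := ⟨j.toNat, (Int.toNat_of_nonneg hj.1).symm⟩
  have hpat : pvPattern [b0, b1, b2] = [b1 - b0, b2 - b1] := by
    simp [pvPattern, show PySem.List.pyRange 0 2 1 = [0, 1] from by decide, PySem.List.pyGetD,
      PySem.List.pyIdx?, PySem.List.pyGet?]
  have hs := pv_slice_diffs H c n 2 (by push_cast; omega)
  simp only [List.range_succ, List.range_zero, List.nil_append, List.map_cons, List.map_nil,
    List.cons_append] at hs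
  rw [hpat]
  simp only [List.length_cons, List.length_nil]
  push_cast at hs ⊢
  rw [hs]
  rw [show PySem.List.pyRange 0 (3 : Int) 1 = [0, 1, 2] from by decide]
  simp [pvCheckA, PySem.List.pyGetD, PySem.List.pyIdx?, PySem.List.pyGet?]
  ring_nf
  omega

lemma pvCond4 (H : List Int) (c b0 b1 b2 b3 : Int) :
    ∀ j ∈ PySem.List.pyRange 0 (c - (([b0, b1, b2, b3] : List Int).length : Int) + 1) 1,
      ((pvCheckA H [b0, b1, b2, b3] j (PySem.List.pyRange 0 ((([b0, b1, b2, b3] : List Int)).length : Int) 1)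
          (PySem.List.pyGetD H j 0 - PySem.List.pyGetD [b0, b1, b2, b3] 0 0)) = true
        ↔ PySem.List.slice (pvDiffs H c) (some j) (some (j + ((pvPattern [b0, b1, b2, b3]).length : Int)))
            = pvPattern [b0, b1, b2, b3]) := by
  intro j hj
  rw [PySem.List.mem_pyRange_one] at hj
  simp only [List.length_cons, List.length_nil] at hj
  push_cast at hj
  obtain ⟨n, rfl⟩ : ∃ n : Nat, j = (n : Int) := ⟨j.toNat, (Int.toNat_of_nonneg hj.1).symm⟩
  have hpat : pvPattern [b0, b1, b2, b3] = [b1 - b0, b2 - b1, b3 - b2] := by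
    simp [pvPattern, show PySem.List.pyRange 0 3 1 = [0, 1, 2] from by decide, PySem.List.pyGetD,
      PySem.List.pyIdx?, PySem.List.pyGet?]
  have hs := pv_slice_diffs H c n 3 (by push_cast; omega)
  simp only [List.range_succ, List.range_zero, List.nil_append, List.map_cons, List.map_nil,
    List.cons_append] at hs
  rw [hpat]
  simp only [List.length_cons, List.length_nil]
  push_cast at hs ⊢
  rw [hs]
  rw [show PySem.List.pyRange 0 (4 : Int) 1 = [0, 1, 2, 3] from by decide]
  simp [pvCheckA, PySem.List.pyGetD, PySem.List.pyIdx?, PySem.List.pyGet?]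
  ring_nf
  omega

-- one rotation: A's j-loop equals B's j-loop, given the per-j bridge
lemma pvPlaceAB (H : List Int) (c : Int) (b : List Int)
    (h : ∀ j ∈ PySem.List.pyRange 0 (c - (b.length : Int) + 1) 1,
      ((pvCheckA H b j (PySem.List.pyRange 0 (b.length : Int) 1)
          (PySem.List.pyGetD H j 0 - PySem.List.pyGetD b 0 0)) = true
        ↔ PySem.List.slice (pvDiffs H c) (some j) (some (j + ((pvPattern b).length : Int)))
            = pvPattern b))
    (ans : Int) :
    pvPlaceA H c b ans = pvPlaceB (pvDiffs H c) c b ans := by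
  unfold pvPlaceA pvPlaceB
  apply PySem.List.foldl_congr_mem'
  intro j hj acc
  by_cases hc : pvCheckA H b j (PySem.List.pyRange 0 (b.length : Int) 1)
      (PySem.List.pyGetD H j 0 - PySem.List.pyGetD b 0 0) = true
  · rw [if_pos hc, if_pos ((h j hj).mp hc)]
  · rw [if_neg hc, if_neg (fun hb => hc ((h j hj).mpr hb))]

lemma pv_solve_eq_of (c p : Int) (H : List Int)
    (h : ∀ b ∈ pvBlockRotate p, ∀ ans, pvPlaceA H c b ans = pvPlaceB (pvDiffs H c) c b ans) :
    solve c p H = solve_alt c p H := by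
  unfold solve solve_alt
  apply PySem.List.foldl_congr_mem'
  intro b hb ans
  exact h b hb ans

-- ===== VERDICT (by name: the statement is the Claim_ definition above) =====
theorem solve_spec : Claim_equal_solve := by
  intro c p heights _ hpre
  show solve c p heights = solve_alt c p heights
  apply pv_solve_eq_of
  intro b hb ans
  have hp : p = 1 ∨ p = 2 ∨ p = 3 ∨ p = 4 ∨ p = 5 ∨ p = 6 ∨ p = 7 := by
    obtain ⟨⟨h1, h7⟩, -⟩ := hpre; omega
  rcases hp with rfl | rfl | rfl | rfl | rfl | rfl | rfl <;>
    · simp only [pvBlockRotate] at hb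
      norm_num at hb
      rcases hb with rfl | rfl | rfl | rfl <;>
        first
          | exact pvPlaceAB heights c _ (pvCond1 heights c _) ans
          | exact pvPlaceAB heights c _ (pvCond2 heights c _ _) ans
          | exact pvPlaceAB heights c _ (pvCond3 heights c _ _ _) ans
          | exact pvPlaceAB heights c _ (pvCond4 heights c _ _ _ _) ans
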